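-- pv_equiv track=rewrite | github.com/dujinle/SemanticAnalysis | modules/timer_ext/time_calendar.py | yearInfo2yearDay
-- ===== SOURCE A (Python) =====
-- def yearInfo2yearDay(yearInfo):
-- 	yearInfo = int(yearInfo)
-- 	res = 29 * 12
-- 	leap = False
-- 	if yearInfo % 16 != 0:
-- 		leap = True
-- 		res += 29
-- 	yearInfo //= 16
--
-- 	for i in range(12 + leap):
-- 		if yearInfo % 2 == 1:
-- 			res += 1
-- 		yearInfo //= 2
-- 	return res
-- ===== SOURCE B (Python) =====
-- def yearInfo2yearDay(yearInfo):
-- 	yearInfo = int(yearInfo)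
-- 	leap = yearInfo % 16 != 0
-- 	n = 12 + leap
-- 	m = (yearInfo // 16) % (1 << n)
-- 	return 29 * 12 + 29 * leap + bin(m).count('1')
-- ===== Notes on version B (the rewrite author's own statement) =====
-- stated objective: simpler
-- what changed: Replaces the per-month shift-and-test loop by a closed-form expression: reduce the month bitfield modulo a power of two once and count the set bits of that single nonnegative residue with bin(m).count('1').
import Mathlib
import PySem

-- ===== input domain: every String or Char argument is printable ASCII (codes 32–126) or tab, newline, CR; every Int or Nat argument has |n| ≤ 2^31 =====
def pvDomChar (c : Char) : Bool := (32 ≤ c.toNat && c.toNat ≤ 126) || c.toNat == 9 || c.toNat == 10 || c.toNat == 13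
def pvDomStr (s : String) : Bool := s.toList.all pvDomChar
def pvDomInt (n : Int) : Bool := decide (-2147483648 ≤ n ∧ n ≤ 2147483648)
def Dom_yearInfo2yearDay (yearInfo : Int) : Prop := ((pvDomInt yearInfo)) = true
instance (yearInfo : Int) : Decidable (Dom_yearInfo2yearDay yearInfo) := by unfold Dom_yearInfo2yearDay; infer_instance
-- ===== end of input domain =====

-- B replaces A's per-month shift-and-test loop by one modular reduction plus a
-- popcount of the resulting nonnegative residue (objective: simpler, closed form).

-- ===== PORT A =====
def yearInfo2yearDay (yearInfo : Int) : Int :=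
  let res : Int := 29 * 12
  let leap : Bool := decide (PySem.Int.mod yearInfo 16 ≠ 0)
  let res : Int := if leap then res + 29 else res
  let y : Int := PySem.Int.floordiv yearInfo 16
  let st :=
    (PySem.List.pyRange 0 (12 + (if leap then 1 else 0)) 1).foldl
      (fun (st : Int × Int) _ =>
        let res := if PySem.Int.mod st.2 2 = 1 then st.1 + 1 else st.1
        (res, PySem.Int.floordiv st.2 2))
      (res, y)
  st.1

-- ===== PORT B =====
-- popcountB m.toNat is exact for bin(m).count('1') on the nonnegative m B feeds it.
def popcountB (n : Nat) : Nat :=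
  if h : n = 0 then 0 else n % 2 + popcountB (n / 2)
decreasing_by exact Nat.div_lt_self (Nat.pos_of_ne_zero h) (by norm_num)

def yearInfo2yearDay_alt (yearInfo : Int) : Int :=
  let leap : Int := if PySem.Int.mod yearInfo 16 ≠ 0 then 1 else 0
  let n : Nat := (12 + leap).toNat
  let m : Int := PySem.Int.mod (PySem.Int.floordiv yearInfo 16) (2 ^ n)
  29 * 12 + 29 * leap + (popcountB m.toNat : Int)

-- ===== PRECONDITION & SPEC =====
def Spec_yearInfo2yearDay (yearInfo : Int) (out : Int) : Prop := out = yearInfo2yearDay_alt yearInfo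
instance (yearInfo : Int) (out : Int) : Decidable (Spec_yearInfo2yearDay yearInfo out) := by unfold Spec_yearInfo2yearDay; infer_instance

-- ===== CLAIM (what is proved, stated in full; the proofs are below) =====
def Claim_equal_yearInfo2yearDay : Prop := ∀ (yearInfo : Int), Dom_yearInfo2yearDay yearInfo → Spec_yearInfo2yearDay yearInfo (yearInfo2yearDay yearInfo)

-- ===== LEMMAS AND PROOFS =====

-- a fold whose function ignores the element is an iterate of the state map
theorem foldl_ignore_iterate {α β : Type} (f : β → β) :
    ∀ (l : List α) (b : β), l.foldl (fun b _ => f b) b = f^[l.length] b := by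
  intro l
  induction l with
  | nil => intro b; rfl
  | cons x xs ih =>
      intro b
      simp [List.foldl_cons, ih, Function.iterate_succ_apply]

theorem popcountB_zero : popcountB 0 = 0 := by unfold popcountB; rfl

theorem popcountB_bit (r M : Nat) (hr : r ≤ 1) :
    popcountB (r + 2 * M) = r + popcountB M := by
  by_cases h : r + 2 * M = 0
  · have hr0 : r = 0 := by omega
    have hM0 : M = 0 := by omega
    simp [hr0, hM0, popcountB_zero]
  · rw [popcountB]
    rw [dif_neg h]
    have h1 : (r + 2 * M) % 2 = r := by omega
    have h2 : (r + 2 * M) / 2 = M := by omega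
    rw [h1, h2]

-- low-bit decomposition of an emod by a doubled power
theorem emod_double (y k : Int) :
    y % (2 * k) = y % 2 + 2 * ((y / 2) % k) := by
  have hdd : y / 2 / k = y / (2 * k) := Int.ediv_ediv_of_nonneg (by norm_num)
  have e1 : y % (2 * k) = y - (2 * k) * (y / (2 * k)) := Int.emod_def y (2 * k)
  have e2 : (y / 2) % k = y / 2 - k * (y / 2 / k) := Int.emod_def (y / 2) k
  have e3 : y % 2 = y - 2 * (y / 2) := Int.emod_def y 2
  rw [e1, e2, e3, hdd]
  ring

-- A's loop body, named for the induction
def pvStep (st : Int × Int) : Int × Int :=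
  ((if PySem.Int.mod st.2 2 = 1 then st.1 + 1 else st.1), PySem.Int.floordiv st.2 2)

theorem iterate_pvStep (n : Nat) : ∀ (res y : Int),
    (pvStep^[n] (res, y)).1 = res + ((popcountB (y % (2 ^ n : Int)).toNat : Nat) : Int) := by
  induction n with
  | zero =>
      intro res y
      simp [popcountB_zero]
  | succ n ih =>
      intro res y
      have hmod : PySem.Int.mod y 2 = y % 2 := PySem.Int.mod_eq_emod_of_pos (by norm_num)
      have hdiv : PySem.Int.floordiv y 2 = y / 2 := PySem.Int.floordiv_eq_ediv_of_pos (by norm_num)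
      have hsplit : y % (2 ^ (n+1) : Int) = y % 2 + 2 * ((y / 2) % (2 ^ n)) := by
        have : (2:Int) ^ (n+1) = 2 * 2 ^ n := by ring
        rw [this]; exact emod_double y (2 ^ n)
      have hr2 : y % 2 = 0 ∨ y % 2 = 1 := Int.emod_two_eq_zero_or_one y
      have hMnn : (0:Int) ≤ (y / 2) % (2 ^ n) := Int.emod_nonneg _ (by positivity)
      have htoNat : (y % (2 ^ (n+1) : Int)).toNat
          = (y % 2).toNat + 2 * ((y / 2) % (2 ^ n)).toNat := by
        rw [hsplit]; rcases hr2 with h | h <;> omega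
      rw [Function.iterate_succ_apply]
      show (pvStep^[n] (pvStep (res, y))).1 = _
      rw [show pvStep (res, y)
            = ((if PySem.Int.mod y 2 = 1 then res + 1 else res), PySem.Int.floordiv y 2) from rfl]
      rw [ih, htoNat, popcountB_bit _ _ (by rcases hr2 with h | h <;> omega)]
      rw [hmod, hdiv]
      rcases hr2 with h | h <;> simp [h] <;> omega

theorem loop_closed (res y b : Int) (n : Nat) (hb : b = (n : Int)) :
    ((PySem.List.pyRange 0 b 1).foldl
      (fun (st : Int × Int) _ =>
        let res := if PySem.Int.mod st.2 2 = 1 then st.1 + 1 else st.1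
        (res, PySem.Int.floordiv st.2 2)) (res, y)).1
    = res + ((popcountB (y % ((2:Int) ^ n)).toNat : Nat) : Int) := by
  have hfun : (fun (st : Int × Int) (_ : Int) =>
      let res := if PySem.Int.mod st.2 2 = 1 then st.1 + 1 else st.1
      (res, PySem.Int.floordiv st.2 2)) = fun st _ => pvStep st := rfl
  rw [hfun, foldl_ignore_iterate pvStep, PySem.List.length_pyRange_one, hb]
  rw [show (((n:Int) - 0).toNat) = n by omega]
  exact iterate_pvStep n res y

-- ===== VERDICT (by name: the statement is the Claim_ definition above) =====
theorem yearInfo2yearDay_spec : Claim_equal_yearInfo2yearDay := by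
  intro yearInfo _
  unfold Spec_yearInfo2yearDay yearInfo2yearDay yearInfo2yearDay_alt
  have hmodpos : ∀ n : Nat, PySem.Int.mod (PySem.Int.floordiv yearInfo 16) ((2:Int) ^ n)
      = (PySem.Int.floordiv yearInfo 16) % ((2:Int) ^ n) := fun n =>
    PySem.Int.mod_eq_emod_of_pos (by positivity)
  by_cases h : PySem.Int.mod yearInfo 16 = 0
  · simp only [h, decide_eq_true_eq, ne_eq, not_true_eq_false, if_false]
    rw [show ((12 : Int) + (0:Int)).toNat = 12 by decide]
    rw [loop_closed _ _ _ 12 (by norm_num), hmodpos 12]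
    ring
  · simp only [h, decide_eq_true_eq, ne_eq, not_false_eq_true, if_true]
    rw [show ((12 : Int) + (1:Int)).toNat = 13 by decide]
    rw [loop_closed _ _ _ 13 (by norm_num), hmodpos 13]
    ring
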